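-- pv_equiv track=rewrite | github.com/qndn3tp/Programmers | 프로그래머스/2/17686. ［3차］ 파일명 정렬/［3차］ 파일명 정렬.py | solution
-- ===== SOURCE A (Python) =====
-- def solution(files):
--     ans = []
--     for file in files:
--         n, t = 0, 0
--         change = True
--         for i in range(len(file)):
--             if file[i].isnumeric() and change:
--                 n = i
--                 change = False
--                 continue
--             if file[i].isnumeric() == False and change == False:
--                 t = i
--                 break
--         if t == 0:
--             t = len(file)
--         f = [file[:n], file[n:t], file[t:]]
--         ans.append(f)
--
--     ans = sorted(ans, key = lambda x: (x[0].lower(), int(x[1])))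
--
--     return [''.join(i) for i in ans]
-- ===== SOURCE B (Python) =====
-- def solution(files):
--     def key(f):
--         head = ''
--         num = ''
--         for c in f:
--             if c.isdigit():
--                 num += c
--             elif num:
--                 break
--             else:
--                 head += c
--         return (head.lower(), int(num))
--     return sorted(files, key=key)
-- ===== Notes on version B (the rewrite author's own statement) =====
-- stated objective: idiomatic
-- what changed: B drops A's intermediate list of [head, number, tail] triples and the final join pass: it sorts the original filenames directly with sorted(files, key=...), computing each key (head.lower(), int(number)) in one pass over the string that accumulates the head and the first digit run.
import Mathlib
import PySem

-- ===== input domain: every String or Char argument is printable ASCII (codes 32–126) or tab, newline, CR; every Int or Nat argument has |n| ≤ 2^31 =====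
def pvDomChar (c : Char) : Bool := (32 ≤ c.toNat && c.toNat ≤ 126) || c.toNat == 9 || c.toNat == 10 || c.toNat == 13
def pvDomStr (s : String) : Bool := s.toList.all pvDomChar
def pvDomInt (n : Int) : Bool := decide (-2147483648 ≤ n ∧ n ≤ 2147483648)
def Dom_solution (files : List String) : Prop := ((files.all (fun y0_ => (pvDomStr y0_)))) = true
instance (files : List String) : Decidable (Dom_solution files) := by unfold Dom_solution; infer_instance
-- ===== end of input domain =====

-- B sorts the filenames directly with a single-pass (head, digit-run) key instead of
-- building, sorting and re-joining [head, number, tail] triples (objective: idiomatic).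

-- ===== PORT A =====
-- A's inner index loop over range(len(file)) with state (n, t, change), `continue` and `break`.
-- On the admitted ASCII domain Python's `c.isnumeric()` is exactly `PySem.Chars.isdigit c`.
def aScan : List Char → Int → Int → Int → Bool → Int × Int
  | [], _, n, t, _ => (n, t)
  | c :: rest, i, n, t, change =>
    if PySem.Chars.isdigit c && change then aScan rest (i + 1) i t false
    else if !PySem.Chars.isdigit c && !change then (n, i)
    else aScan rest (i + 1) n t change

-- A's per-file body: f = [file[:n], file[n:t], file[t:]]  (string slices taken on the
-- code-point list, which is exactly Python's string slicing on this domain).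
def aSplit (file : String) : List String :=
  let cs := file.toList
  let nt := aScan cs 0 0 0 true
  let n := nt.1
  let t := if nt.2 = 0 then (cs.length : Int) else nt.2
  [String.ofList (PySem.List.slice cs none (some n)),
   String.ofList (PySem.List.slice cs (some n) (some t)),
   String.ofList (PySem.List.slice cs (some t) none)]

def solution (files : List String) : List String :=
  let ans := files.foldl (fun acc file => acc ++ [aSplit file]) []
  let ans := PySem.List.sorted2 ans
    (fun x => PySem.Str.lower ((PySem.List.pyGet? x 0).getD ""))
    (fun x => (PySem.Int.ofStr? ((PySem.List.pyGet? x 1).getD "")).getD 0) false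
  ans.map (fun i => PySem.Str.join "" i)

-- ===== PORT B =====
-- B's single pass over the characters accumulating the head and the first digit run.
def bLoop : List Char → List Char → List Char → List Char × List Char
  | [], head, num => (head, num)
  | c :: rest, head, num =>
    if PySem.Chars.isdigit c then bLoop rest head (num ++ [c])
    else if num ≠ [] then (head, num)
    else bLoop rest (head ++ [c]) num

def bKey (f : String) : String × Int :=
  let hn := bLoop f.toList [] []
  (PySem.Str.lower (String.ofList hn.1), (PySem.Int.ofChars? hn.2).getD 0)

def solution_alt (files : List String) : List String :=
  PySem.List.sorted2 files (fun f => (bKey f).1) (fun f => (bKey f).2) false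

-- ===== PRECONDITION & SPEC =====
-- Pre_ excludes inputs containing a filename with no decimal digit: there A calls int()
-- on a digit-free string and raises ValueError (B's int() raises there as well).
def Pre_solution (files : List String) : Prop :=
  (files.all (fun f => f.toList.any PySem.Chars.isdigit)) = true
instance (files : List String) : Decidable (Pre_solution files) := by unfold Pre_solution; infer_instance

def pvWitness_solution : List String := ["img12.png", "IMG10.PNG", "F-5 Freedom Fighter"]

def Spec_solution (files : List String) (out : List String) : Prop := out = solution_alt files
instance (files : List String) (out : List String) : Decidable (Spec_solution files out) := by unfold Spec_solution; infer_instance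

-- ===== CLAIM (what is proved, stated in full; the proofs are below) =====
def Claim_equal_solution : Prop := ∀ (files : List String), Dom_solution files → Pre_solution files → Spec_solution files (solution files)

-- ===== LEMMAS AND PROOFS =====

lemma aScan_false (cs : List Char) : ∀ (i n t : Int),
    aScan cs i n t false =
      if (cs.takeWhile PySem.Chars.isdigit).length = cs.length then (n, t)
      else (n, i + (cs.takeWhile PySem.Chars.isdigit).length) := by
  induction cs with
  | nil => intro i n t; simp [aScan]
  | cons c r ih =>
    intro i n t
    by_cases hd : PySem.Chars.isdigit c
    · simp [aScan, hd, ih]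
      split_ifs with h1 <;> simp <;> ring
    · simp [aScan, hd]

lemma aScan_true (cs : List Char) : ∀ (i n t : Int),
    aScan cs i n t true =
      if (cs.takeWhile (fun c => !PySem.Chars.isdigit c)).length = cs.length then (n, t)
      else
        aScan (cs.drop ((cs.takeWhile (fun c => !PySem.Chars.isdigit c)).length + 1))
          (i + (cs.takeWhile (fun c => !PySem.Chars.isdigit c)).length + 1)
          (i + (cs.takeWhile (fun c => !PySem.Chars.isdigit c)).length) t false := by
  induction cs with
  | nil => intro i n t; simp [aScan]
  | cons c r ih =>
    intro i n t
    by_cases hd : PySem.Chars.isdigit c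
    · simp [aScan, hd]
    · rw [show aScan (c :: r) i n t true = aScan r (i+1) n t true by simp [aScan, hd]]
      rw [ih]
      simp [List.takeWhile_cons, hd]
      split_ifs with h1 <;> try omega
      · rfl
      · have : ((i + 1 : Int) + ↑(List.takeWhile (fun c => !PySem.Chars.isdigit c) r).length)
           = i + (↑(List.takeWhile (fun c => !PySem.Chars.isdigit c) r).length + 1) := by push_cast; ring
        rw [show ((i + 1 : Int) + ↑(List.takeWhile (fun c => !PySem.Chars.isdigit c) r).length + 1)
           = i + (↑(List.takeWhile (fun c => !PySem.Chars.isdigit c) r).length + 1) + 1 by push_cast; ring, this]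

lemma takeWhile_length_eq_iff {q : Char → Bool} (cs : List Char) :
    (cs.takeWhile q).length = cs.length ↔ ∀ c ∈ cs, q c := by
  constructor
  · intro h
    have := List.takeWhile_eq_self_iff.mp (List.Sublist.eq_of_length (List.takeWhile_sublist q) h)
    intro c hc; exact this c hc
  · intro h; rw [List.takeWhile_eq_self_iff.mpr h]

lemma getElem_length_takeWhile (q : Char → Bool) (cs : List Char)
    (h : (cs.takeWhile q).length < cs.length) : q (cs[(cs.takeWhile q).length]'h) = false := by
  induction cs with
  | nil => simp at h
  | cons c r ih =>
    by_cases hq : q c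
    · simp [List.takeWhile_cons, hq] at h ⊢
      exact ih (by omega)
    · simp [List.takeWhile_cons, hq]

lemma take_length_takeWhile (q : Char → Bool) (cs : List Char) :
    cs.take (cs.takeWhile q).length = cs.takeWhile q :=
  (List.prefix_iff_eq_take.mp (List.takeWhile_prefix q)).symm

-- the scan + "if t == 0" adjustment yields (head-length, head-length + digit-run-length)

lemma nt_spec (cs : List Char) (h : cs.any PySem.Chars.isdigit = true) :
    (aScan cs 0 0 0 true).1 = ((cs.takeWhile (fun c => !PySem.Chars.isdigit c)).length : Int) ∧
    (if (aScan cs 0 0 0 true).2 = 0 then (cs.length : Int) else (aScan cs 0 0 0 true).2) =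
      (((cs.takeWhile (fun c => !PySem.Chars.isdigit c)).length : Nat) +
       ((cs.drop (cs.takeWhile (fun c => !PySem.Chars.isdigit c)).length).takeWhile PySem.Chars.isdigit).length : Int) := by
  have hkle : (cs.takeWhile (fun c => !PySem.Chars.isdigit c)).length ≤ cs.length :=
    (cs.takeWhile_sublist _).length_le
  have hklt : (cs.takeWhile (fun c => !PySem.Chars.isdigit c)).length < cs.length := by
    rcases lt_or_eq_of_le hkle with h' | h'
    · exact h'
    · exfalso
      have hall := (takeWhile_length_eq_iff cs).mp h'
      simp only [List.any_eq_true] at h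
      obtain ⟨c, hc, hdc⟩ := h
      have := hall c hc; simp [hdc] at this
  generalize hk : (cs.takeWhile (fun c => !PySem.Chars.isdigit c)).length = k at *
  have hdk : PySem.Chars.isdigit (cs[k]'hklt) = true := by
    have := getElem_length_takeWhile (fun c => !PySem.Chars.isdigit c) cs (hk ▸ hklt)
    simp only [Bool.not_eq_eq_eq_not, Bool.not_true] at this
    simpa [hk] using this
  have hdropk : cs.drop k = cs[k]'hklt :: cs.drop (k+1) := List.drop_eq_getElem_cons hklt
  have hdlen : ((cs.drop k).takeWhile PySem.Chars.isdigit).length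
      = ((cs.drop (k+1)).takeWhile PySem.Chars.isdigit).length + 1 := by
    rw [hdropk, List.takeWhile_cons, if_pos hdk]; simp
  have hjle : ((cs.drop (k+1)).takeWhile PySem.Chars.isdigit).length ≤ (cs.drop (k+1)).length :=
    ((cs.drop (k+1)).takeWhile_sublist _).length_le
  have hlen : (cs.drop (k+1)).length = cs.length - (k+1) := by simp
  have hscan : aScan cs 0 0 0 true = aScan (cs.drop (k+1)) ((k:Int)+1) (k:Int) 0 false := by
    rw [aScan_true, hk, if_neg (by omega)]
    norm_num
  rw [hscan, aScan_false]
  by_cases hfull : ((cs.drop (k+1)).takeWhile PySem.Chars.isdigit).length = (cs.drop (k+1)).length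
  · rw [if_pos hfull]
    constructor
    · rfl
    · simp only [if_pos rfl]
      rw [hdlen]
      push_cast
      omega
  · rw [if_neg hfull]
    constructor
    · rfl
    · have hne : ((k:Int) + 1 + ((cs.drop (k+1)).takeWhile PySem.Chars.isdigit).length) ≠ 0 := by
        push_cast; omega
      simp only [hne, if_neg]
      rw [hdlen]
      push_cast
      ring

-- the characterisation of A's per-file triple on a string containing a digit

lemma aSplit_eq (f : String) (h : f.toList.any PySem.Chars.isdigit = true) :
    aSplit f =
      [String.ofList (f.toList.takeWhile (fun c => !PySem.Chars.isdigit c)),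
       String.ofList ((f.toList.drop (f.toList.takeWhile (fun c => !PySem.Chars.isdigit c)).length).takeWhile PySem.Chars.isdigit),
       String.ofList (f.toList.drop ((f.toList.takeWhile (fun c => !PySem.Chars.isdigit c)).length +
          ((f.toList.drop (f.toList.takeWhile (fun c => !PySem.Chars.isdigit c)).length).takeWhile PySem.Chars.isdigit).length))] := by
  obtain ⟨h1, h2⟩ := nt_spec f.toList h
  simp only [aSplit, h1, h2]
  clear h1 h2 h
  generalize f.toList = cs
  rw [show ((((cs.takeWhile (fun c => !PySem.Chars.isdigit c)).length : Nat) : Int) +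
        (((cs.drop (cs.takeWhile (fun c => !PySem.Chars.isdigit c)).length).takeWhile PySem.Chars.isdigit).length : Int)) =
      ((((cs.takeWhile (fun c => !PySem.Chars.isdigit c)).length +
        ((cs.drop (cs.takeWhile (fun c => !PySem.Chars.isdigit c)).length).takeWhile PySem.Chars.isdigit).length : Nat)) : Int)
      by push_cast; ring]
  rw [PySem.List.slice_to _ (by positivity), PySem.List.slice_from _ (by positivity), PySem.List.slice_natCast]
  simp only [Int.toNat_natCast]
  congr 1
  · rw [take_length_takeWhile]
  congr 1
  rw [show (cs.takeWhile (fun c => !PySem.Chars.isdigit c)).length +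
        ((cs.drop (cs.takeWhile (fun c => !PySem.Chars.isdigit c)).length).takeWhile PySem.Chars.isdigit).length -
        (cs.takeWhile (fun c => !PySem.Chars.isdigit c)).length =
        ((cs.drop (cs.takeWhile (fun c => !PySem.Chars.isdigit c)).length).takeWhile PySem.Chars.isdigit).length by omega]
  rw [take_length_takeWhile]

lemma bLoop_num_ne (cs : List Char) : ∀ (head num : List Char), num ≠ [] →
    bLoop cs head num = (head, num ++ cs.takeWhile PySem.Chars.isdigit) := by
  induction cs with
  | nil => intro head num h; simp [bLoop]
  | cons c r ih =>
    intro head num h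
    by_cases hd : PySem.Chars.isdigit c
    · rw [show bLoop (c :: r) head num = bLoop r head (num ++ [c]) by simp [bLoop, hd]]
      rw [ih _ _ (by simp)]
      simp [List.takeWhile_cons, hd]
    · simp [bLoop, hd, h, List.takeWhile_cons]

lemma bLoop_nil (cs : List Char) : ∀ (head : List Char),
    bLoop cs head [] =
      if (cs.takeWhile (fun c => !PySem.Chars.isdigit c)).length = cs.length then (head ++ cs, [])
      else (head ++ cs.takeWhile (fun c => !PySem.Chars.isdigit c),
        (cs.drop (cs.takeWhile (fun c => !PySem.Chars.isdigit c)).length).takeWhile PySem.Chars.isdigit) := by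
  induction cs with
  | nil => intro head; simp [bLoop]
  | cons c r ih =>
    intro head
    by_cases hd : PySem.Chars.isdigit c
    · rw [show bLoop (c :: r) head [] = bLoop r head [c] by simp [bLoop, hd]]
      rw [bLoop_num_ne r head [c] (by simp)]
      simp [List.takeWhile_cons, hd]
    · rw [show bLoop (c :: r) head [] = bLoop r (head ++ [c]) [] by simp [bLoop, hd]]
      rw [ih]
      simp [hd]

lemma bKey_eq (f : String) (h : f.toList.any PySem.Chars.isdigit = true) :
    bKey f = (PySem.Str.lower (String.ofList (f.toList.takeWhile (fun c => !PySem.Chars.isdigit c))),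
      (PySem.Int.ofChars? ((f.toList.drop (f.toList.takeWhile (fun c => !PySem.Chars.isdigit c)).length).takeWhile PySem.Chars.isdigit)).getD 0) := by
  have hklt : (f.toList.takeWhile (fun c => !PySem.Chars.isdigit c)).length ≠ f.toList.length := by
    intro h'
    have hall := (takeWhile_length_eq_iff f.toList).mp h'
    simp only [List.any_eq_true] at h
    obtain ⟨c, hc, hdc⟩ := h
    have := hall c hc; simp [hdc] at this
  simp only [bKey, bLoop_nil, if_neg hklt]
  simp

lemma keys_eq (f : String) (h : f.toList.any PySem.Chars.isdigit = true) :
    PySem.Str.lower ((PySem.List.pyGet? (aSplit f) 0).getD "") = (bKey f).1 ∧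
    (PySem.Int.ofStr? ((PySem.List.pyGet? (aSplit f) 1).getD "")).getD 0 = (bKey f).2 := by
  rw [aSplit_eq f h, bKey_eq f h]
  constructor
  · simp [PySem.List.pyGet?, PySem.List.pyIdx?]
  · simp [PySem.List.pyGet?, PySem.List.pyIdx?, PySem.Int.ofStr?]

lemma drop_length_takeWhile (q : Char → Bool) (l : List Char) :
    l.drop (l.takeWhile q).length = l.dropWhile q := by
  induction l with
  | nil => simp
  | cons c r ih =>
    by_cases hq : q c
    · simp [hq, ih]
    · simp [hq]

lemma reassemble (q d : Char → Bool) (l : List Char) :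
    l.takeWhile q ++ ((l.drop (l.takeWhile q).length).takeWhile d ++
      l.drop ((l.takeWhile q).length + ((l.drop (l.takeWhile q).length).takeWhile d).length)) = l := by
  rw [← List.drop_drop]
  rw [drop_length_takeWhile q l, drop_length_takeWhile d (l.dropWhile q)]
  rw [List.takeWhile_append_dropWhile, List.takeWhile_append_dropWhile]

lemma join_aSplit (f : String) (h : f.toList.any PySem.Chars.isdigit = true) :
    PySem.Str.join "" (aSplit f) = f := by
  rw [aSplit_eq f h]
  rw [PySem.Str.join]
  refine Eq.trans (congrArg String.ofList ?_) String.ofList_toList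
  simp only [List.map_cons, List.map_nil, String.toList_ofList]
  have hj : ∀ (a b c : List Char), PySem.Chars.join "".toList [a, b, c] = a ++ (b ++ c) := by
    intro a b c; simp [PySem.Chars.join, List.intercalate]
  rw [hj]
  exact reassemble _ _ _

lemma insertBy_map {α β : Type} (g : α → β) (cβ : β → β → Bool) (cα : α → α → Bool)
    (x : α) (ys : List α) (h : ∀ y ∈ ys, cβ (g x) (g y) = cα x y) :
    PySem.List.insertBy cβ (g x) (ys.map g) = (PySem.List.insertBy cα x ys).map g := by
  induction ys with
  | nil => simp [PySem.List.insertBy]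
  | cons y t ih =>
    have hy := h y (by simp)
    simp only [List.map_cons, PySem.List.insertBy, hy]
    by_cases hb : cα x y
    · simp [hb]
    · rw [if_neg (by simp [hb]), if_neg (by simp [hb])]
      simp only [List.map_cons]
      rw [ih (fun z hz => h z (by simp [hz]))]

lemma foldl_insertBy_map {α β : Type} (g : α → β) (cβ : β → β → Bool) (cα : α → α → Bool)
    (P : α → Prop) (hc : ∀ x y, P x → P y → cβ (g x) (g y) = cα x y) :
    ∀ (xs acc : List α), (∀ x ∈ xs, P x) → (∀ y ∈ acc, P y) →
      List.foldl (fun a b => PySem.List.insertBy cβ b a) (acc.map g) (xs.map g)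
        = (List.foldl (fun a b => PySem.List.insertBy cα b a) acc xs).map g := by
  intro xs
  induction xs with
  | nil => intro acc _ _; simp
  | cons x t ih =>
    intro acc hxs hacc
    simp only [List.map_cons, List.foldl_cons]
    rw [insertBy_map g cβ cα x acc (fun y hy => hc x y (hxs x (by simp)) (hacc y hy))]
    exact ih _ (fun z hz => hxs z (by simp [hz]))
      (fun z hz => by
        rcases (PySem.List.mem_insertBy cα x z acc).mp hz with h' | h'
        · exact h' ▸ hxs x (by simp)
        · exact hacc z h')

lemma sorted2_map_congr {α β κ₁ κ₂ : Type} [LT κ₁] [DecidableLT κ₁] [LT κ₂] [DecidableLT κ₂]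
    (g : α → β) (K1 : β → κ₁) (K2 : β → κ₂) (k1 : α → κ₁) (k2 : α → κ₂) (xs : List α)
    (h : ∀ x ∈ xs, K1 (g x) = k1 x ∧ K2 (g x) = k2 x) :
    PySem.List.sorted2 (xs.map g) K1 K2 false = (PySem.List.sorted2 xs k1 k2 false).map g := by
  simp only [PySem.List.sorted2]
  exact foldl_insertBy_map g _ _ (fun x => K1 (g x) = k1 x ∧ K2 (g x) = k2 x)
    (fun x y hx hy => by simp only [if_neg (by simp : ¬(false = true))]; rw [hx.1, hx.2, hy.1, hy.2]) xs []
    (fun x hx => h x hx) (by simp)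

-- ===== VERDICT (by name: the statement is the Claim_ definition above) =====
theorem solution_spec : Claim_equal_solution := by
  intro files _hdom hpre
  have hpre' : ∀ f ∈ files, f.toList.any PySem.Chars.isdigit = true := by
    simpa [Pre_solution, List.all_eq_true] using hpre
  show solution files = solution_alt files
  simp only [solution, solution_alt]
  rw [PySem.List.foldl_append_singleton_eq_map, List.nil_append]
  rw [sorted2_map_congr aSplit _ _ (fun f => (bKey f).1) (fun f => (bKey f).2) files
    (fun f hf => keys_eq f (hpre' f hf))]
  rw [List.map_map]
  simp only [Function.comp_def]
  have hmem : ∀ s ∈ PySem.List.sorted2 files (fun f => (bKey f).1) (fun f => (bKey f).2) false, s ∈ files :=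
    fun s hs => (List.Perm.mem_iff (PySem.List.sorted2_perm files _ _ _)).mp hs
  rw [List.map_congr_left (fun s hs => join_aSplit s (hpre' s (hmem s hs)))]
  exact List.map_id _
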